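-- pv_equiv track=rewrite | github.com/kkamankun/python-for-coding-test | 1회/dfs_and_bfs/q18_괄호 변환.py | solution
-- ===== SOURCE A (Python) =====
-- def is_pair(s):
--     stack = []
--     for ch in s:
--         if ch == '(':
--             stack.append(ch)
--         elif ch == ')':
--             try:
--                 stack.pop()
--             except IndexError:
--                 return False
--     return len(stack) == 0
--
-- def reverse(s):
--     r_s = ''
--     for ch in s:
--         if ch == '(':
--             r_s += ')'
--         else:
--             r_s += '('
--     return r_s
--
-- def solution(p):
--     if p == '':
--         return ''
--     u, v = '', ''
--     for i in range(len(p)):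
--         u += p[i]
--         if u.count('(') == u.count(')'):
--             v = p[i + 1:]
--             break
--     if is_pair(u):
--         return u + solution(v)
--     else:
--         return '(' + solution(v) + ')' + reverse(u[1:len(u) - 1])
-- ===== SOURCE B (Python) =====
-- def solution(p):
--     # Iterative: one while-loop with an explicit pending-suffix stack replaces A's
--     # recursion; the split point and validity come from a single running-balance scan.
--     parts = []
--     tails = []
--     while p:
--         bal = 0
--         neg = False
--         cut = len(p)
--         for i, ch in enumerate(p):
--             if ch == '(':
--                 bal += 1
--             elif ch == ')':
--                 bal -= 1
--                 if bal < 0: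
--                     neg = True
--             if bal == 0:
--                 cut = i + 1
--                 break
--         u = p[:cut]
--         p = p[cut:]
--         if bal == 0 and not neg:
--             parts.append(u)
--         else:
--             parts.append('(')
--             tails.append(')' + ''.join(')' if c == '(' else '(' for c in u[1:-1]))
--     return ''.join(parts) + ''.join(reversed(tails))
-- ===== Notes on version B (the rewrite author's own statement) =====
-- stated objective: faster
-- what changed: B replaces A's recursion by a single iterative while-loop that keeps an explicit stack of pending suffix pieces and joins everything once at the end, and finds each split point with one running-balance scan (which also detects validity) instead of recomputing both bracket counts over the growing prefix at every character.
import Mathlib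
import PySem

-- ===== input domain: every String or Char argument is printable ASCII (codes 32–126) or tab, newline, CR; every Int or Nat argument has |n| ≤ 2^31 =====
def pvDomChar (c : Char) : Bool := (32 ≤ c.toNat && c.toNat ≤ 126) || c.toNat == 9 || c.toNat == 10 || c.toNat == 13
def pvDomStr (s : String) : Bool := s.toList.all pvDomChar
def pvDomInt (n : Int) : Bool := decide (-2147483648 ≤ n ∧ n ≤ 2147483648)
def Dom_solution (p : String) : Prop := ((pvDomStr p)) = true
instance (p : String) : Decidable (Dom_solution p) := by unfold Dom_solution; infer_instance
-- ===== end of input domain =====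

-- B replaces A's recursion by one iterative while-loop with an explicit pending-suffix
-- stack, finding each split with a single running-balance scan; equal return values proved.

-- ===== PORT A =====

-- is_pair: stack-based scan; pop on empty stack returns False early
def isPairLoop : List Char → List Char → Bool
  | [], stack => stack.length == 0
  | ch :: rest, stack =>
      if ch = '(' then isPairLoop rest ('(' :: stack)
      else if ch = ')' then
        match stack with
        | [] => false
        | _ :: s => isPairLoop rest s
      else isPairLoop rest stack

-- reverse: builds the flipped string char by char
def revA : List Char → List Char
  | [] => []
  | ch :: rest => (if ch = '(' then ')' else '(') :: revA rest

-- the for-i-in-range loop with break: u grows one char at a time, counts recomputed each step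
-- (u.count('(') on a 1-char needle is the char count; p[i+1:] is List.drop (i+1))
def aScan (p : List Char) (i : Nat) (u : List Char) : List Char × List Char :=
  if h : i < p.length then
    if (u ++ [p[i]]).count '(' = (u ++ [p[i]]).count ')' then (u ++ [p[i]], p.drop (i + 1))
    else aScan p (i + 1) (u ++ [p[i]])
  else (u, [])
termination_by p.length - i

theorem aScan_snd_lt (p : List Char) (hp : 0 < p.length) :
    ∀ k i u, p.length - i ≤ k → ((aScan p i u).2).length < p.length := by
  intro k
  induction k with
  | zero =>
      intro i u hk
      rw [aScan, dif_neg (by omega)]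
      simpa using hp
  | succ k ih =>
      intro i u hk
      rw [aScan]
      by_cases h : i < p.length
      · rw [dif_pos h]
        split
        · simpa using by omega
        · exact ih (i + 1) _ (by omega)
      · rw [dif_neg h]
        simpa using hp

def solution (p : String) : String :=
  if p = "" then ""
  else
    let uv := aScan p.toList 0 []
    if isPairLoop uv.1 [] then String.ofList uv.1 ++ solution (String.ofList uv.2)
    else "(" ++ solution (String.ofList uv.2) ++ ")" ++
      String.ofList (revA (PySem.List.slice uv.1 (some 1) (some ((uv.1.length : Int) - 1))))
termination_by p.toList.length
decreasing_by
  all_goals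
    simp only [String.toList_ofList]
    exact aScan_snd_lt p.toList
      (List.length_pos_iff.mpr (fun hl => ‹¬ p = ""› (String.toList_eq_nil_iff.mp hl)))
      p.toList.length 0 [] (by omega)

-- ===== PORT B =====

-- the generator's flip: ')' if c == '(' else '('
def pyFlip (c : Char) : Char := if c = '(' then ')' else '('

-- the inner for-loop: running balance, negativity flag, break at first balance 0
-- (returns (cut, bal, neg); cut defaults to len(p) when no break fires)
def bScan : List Char → Int → Bool → Nat → Nat × Int × Bool
  | [], bal, neg, i => (i, bal, neg)
  | ch :: rest, bal, neg, i =>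
      let b := if ch = '(' then bal + 1 else if ch = ')' then bal - 1 else bal
      let n := neg || (decide (ch = ')') && decide (b < 0))
      if b = 0 then (i + 1, b, n) else bScan rest b n (i + 1)

theorem bScan_fst_ge : ∀ (l : List Char) (b : Int) (ng : Bool) (i : Nat), i ≤ (bScan l b ng i).1 := by
  intro l
  induction l with
  | nil => intro b ng i; simp [bScan]
  | cons c rest ih =>
      intro b ng i
      simp only [bScan]
      by_cases hb : (if c = '(' then b + 1 else if c = ')' then b - 1 else b) = 0
      · rw [if_pos hb]; simp
      · rw [if_neg hb]; exact Nat.le_of_succ_le (ih _ _ (i + 1))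

theorem bScan_fst_pos (c : Char) (rest : List Char) (b : Int) (ng : Bool) :
    1 ≤ (bScan (c :: rest) b ng 0).1 := by
  simp only [bScan]
  by_cases hb : (if c = '(' then b + 1 else if c = ')' then b - 1 else b) = 0
  · rw [if_pos hb]
  · rw [if_neg hb]; exact le_trans (by omega) (bScan_fst_ge rest _ _ 1)

-- the while-loop: parts collects prefix pieces, tails stacks the pending suffix pieces
def bLoop : List Char → List String → List String → String
  | [], parts, tails => String.join parts ++ String.join tails.reverse
  | c :: cs, parts, tails =>
      let r := bScan (c :: cs) 0 false 0
      let u := (c :: cs).take r.1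
      if r.2.1 = 0 ∧ r.2.2 = false then
        bLoop ((c :: cs).drop r.1) (parts ++ [String.ofList u]) tails
      else
        bLoop ((c :: cs).drop r.1) (parts ++ ["("])
          (tails ++ [")" ++ String.ofList (((u.drop 1).dropLast).map pyFlip)])
termination_by l _ _ => l.length
decreasing_by
  all_goals
    simp only [List.length_drop, List.length_cons]
    have h1 := bScan_fst_pos c cs 0 false
    omega

def solution_alt (p : String) : String := bLoop p.toList [] []

-- ===== PRECONDITION & SPEC =====
def Spec_solution (p : String) (out : String) : Prop := out = solution_alt p
instance (p : String) (out : String) : Decidable (Spec_solution p out) := by unfold Spec_solution; infer_instance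

-- ===== CLAIM (what is proved, stated in full; the proofs are below) =====
def Claim_equal_solution : Prop := ∀ (p : String), Dom_solution p → Spec_solution p (solution p)

-- ===== LEMMAS AND PROOFS =====

-- proof-side characterisation of is_pair: balance never drops below 0 and ends at 0
def bOk : List Char → Int → Bool
  | [], b => decide (b = 0)
  | ch :: rest, b =>
      if ch = '(' then bOk rest (b + 1)
      else if ch = ')' then (if b - 1 < 0 then false else bOk rest (b - 1))
      else bOk rest b

theorem isPairLoop_eq_bOk : ∀ (s : List Char) (stack : List Char),
    isPairLoop s stack = bOk s (stack.length : Int) := by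
  intro s
  induction s with
  | nil => intro stack; cases stack <;> simp [isPairLoop, bOk] <;> omega
  | cons ch rest ih =>
      intro stack
      simp only [isPairLoop, bOk]
      split
      · simpa using ih ('(' :: stack)
      · split
        · cases stack with
          | nil => simp
          | cons c s =>
              rw [if_neg (by push_cast [List.length_cons]; omega)]
              simpa using ih s
        · exact ih stack

-- the neg flag only accumulates: the other components ignore it
theorem bScan_ng : ∀ (l : List Char) (b : Int) (ng : Bool) (i : Nat),
    bScan l b ng i =
      ((bScan l b false i).1, (bScan l b false i).2.1, ng || (bScan l b false i).2.2) := by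
  intro l
  induction l with
  | nil => intro b ng i; simp [bScan]
  | cons ch rest ih =>
      intro b ng i
      simp only [bScan, Bool.false_or]
      by_cases hb : (if ch = '(' then b + 1 else if ch = ')' then b - 1 else b) = 0
      · simp only [if_pos hb]
      · simp only [if_neg hb]
        rw [ih _ (ng || _) (i + 1), ih _ (decide (ch = ')') && _) (i + 1)]
        simp [Bool.or_assoc]

theorem revA_eq_map : ∀ l : List Char, revA l = l.map pyFlip := by
  intro l
  induction l with
  | nil => rfl
  | cons c rest ih => simp [revA, pyFlip, ih]

theorem slice_eq_dropLast (u : List Char) (hu : u ≠ []) :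
    PySem.List.slice u (some 1) (some ((u.length : Int) - 1)) = (u.drop 1).dropLast := by
  have h1 : 1 ≤ u.length := List.length_pos_iff.mpr hu
  have h2 : ((u.length : Int) - 1) = ((u.length - 1 : Nat) : Int) := by push_cast [h1]; ring
  rw [h2, show ((1 : Int)) = ((1 : Nat) : Int) from rfl, PySem.List.slice_natCast]
  rw [List.dropLast_eq_take]
  simp only [List.length_drop]

-- prefix balance: opens minus closes
def bal (l : List Char) : Int := (l.count '(' : Int) - (l.count ')' : Int)

theorem bal_take_succ (p : List Char) (i : Nat) (h : i < p.length) :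
    bal (p.take (i + 1)) =
      (if p[i] = '(' then bal (p.take i) + 1
       else if p[i] = ')' then bal (p.take i) - 1 else bal (p.take i)) := by
  have ht : p.take (i + 1) = p.take i ++ [p[i]] := by
    rw [← List.take_concat_get h, List.concat_eq_append]
  rw [ht]
  simp only [bal, List.count_append, List.count_singleton]
  by_cases h1 : p[i] = '('
  · simp only [h1]
    simp
    ring
  · by_cases h2 : p[i] = ')'
    · simp only [h2]
      simp
      ring
    · simp [h1, h2]

theorem aScan_eq (p : List Char) :
    ∀ k i, p.length - i ≤ k → i ≤ p.length →
      aScan p i (p.take i) =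
        (p.take ((bScan (p.drop i) (bal (p.take i)) false i).1),
         p.drop ((bScan (p.drop i) (bal (p.take i)) false i).1)) := by
  intro k
  induction k with
  | zero =>
      intro i hk hi
      have he : i = p.length := by omega
      subst he
      simp [aScan, bScan]
  | succ k ih =>
      intro i hk hi
      by_cases h : i < p.length
      · have hdrop : p.drop i = p[i] :: p.drop (i + 1) := List.drop_eq_getElem_cons h
        have ht : p.take i ++ [p[i]] = p.take (i + 1) := by
          rw [← List.take_concat_get h, List.concat_eq_append]
        have hbal := bal_take_succ p i h
        rw [aScan, dif_pos h, ht, hdrop]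
        simp only [bScan, ← hbal]
        have hcond : ((p.take (i + 1)).count '(' = (p.take (i + 1)).count ')') ↔
            bal (p.take (i + 1)) = 0 := by unfold bal; omega
        by_cases hz : bal (p.take (i + 1)) = 0
        · rw [if_pos (hcond.mpr hz), if_pos hz]
        · rw [if_neg (fun hc => hz (hcond.mp hc)), if_neg hz]
          rw [bScan_ng]
          exact ih (i + 1) (by omega) (by omega)
      · have he : i = p.length := by omega
        subst he
        simp [aScan, bScan]

theorem bScan_ok : ∀ (l : List Char) (b : Int) (i : Nat),
    bOk (l.take ((bScan l b false i).1 - i)) b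
      = (decide ((bScan l b false i).2.1 = 0) && !(bScan l b false i).2.2) := by
  intro l
  induction l with
  | nil => intro b i; simp [bScan, bOk]
  | cons ch rest ih =>
      intro b i
      simp only [bScan, Bool.false_or]
      by_cases hb : (if ch = '(' then b + 1 else if ch = ')' then b - 1 else b) = 0
      · simp only [if_pos hb]
        have h1 : i + 1 - i = 1 := by omega
        simp only [h1, List.take_succ_cons, List.take_zero]
        by_cases hc : ch = '('
        · subst hc
          simp only [if_pos rfl] at hb
          simp [bOk, hb]
        · by_cases hc2 : ch = ')'
          · subst hc2
            simp only [show ((')':Char) = '(') = False from by simp, if_neg id,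
              if_pos rfl] at hb
            simp [bOk, hb]
            rw [Bool.and_comm]
          · simp only [if_neg hc, if_neg hc2] at hb
            simp [bOk, hc, hc2, hb]
      · simp only [if_neg hb]
        rw [bScan_ng]
        have hge : i + 1 ≤ (bScan rest (if ch = '(' then b + 1 else if ch = ')' then b - 1 else b)
            false (i + 1)).1 := bScan_fst_ge _ _ _ _
        have htake : ∀ m : Nat, i + 1 ≤ m →
            (ch :: rest).take (m - i) = ch :: rest.take (m - (i + 1)) := by
          intro m hm
          have hstep : m - i = (m - (i + 1)) + 1 := by omega
          rw [hstep, List.take_succ_cons]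
        simp only [htake _ hge]
        by_cases hc : ch = '('
        · subst hc
          simp only [if_pos rfl] at hge ⊢
          simp only [bOk, if_pos rfl]
          simpa using ih (b + 1) (i + 1)
        · by_cases hc2 : ch = ')'
          · subst hc2
            simp only [show ((')':Char) = '(') = False from by simp, if_neg id, if_pos rfl]
              at hge ⊢
            by_cases hneg : b - 1 < 0
            · simp [bOk, hneg]
            · simpa [bOk, hneg] using ih (b - 1) (i + 1)
          · simp only [if_neg hc, if_neg hc2] at hge ⊢
            simp only [bOk, if_neg hc, if_neg hc2]
            have hd : decide (ch = ')') = false := by simp [hc2]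
            simp only [hd, Bool.false_and, Bool.false_or]
            exact ih b (i + 1)

theorem join_snoc (xs : List String) (s : String) :
    String.join (xs ++ [s]) = String.join xs ++ s := by
  simp [String.join]

theorem join_foldl_aux (xs : List String) : ∀ a : String,
    List.foldl (fun r s => r ++ s) a xs = a ++ List.foldl (fun r s => r ++ s) "" xs := by
  induction xs with
  | nil => intro a; simp
  | cons x xs ih =>
      intro a
      simp only [List.foldl_cons]
      rw [ih (a ++ x), ih ("" ++ x)]
      simp [String.append_assoc]

theorem join_cons (s : String) (xs : List String) :
    String.join (s :: xs) = s ++ String.join xs := by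
  simp only [String.join, List.foldl_cons]
  rw [join_foldl_aux xs ("" ++ s)]
  simp

theorem bLoop_eq : ∀ n (l : List Char), l.length = n → ∀ parts tails,
    bLoop l parts tails =
      String.join parts ++ solution (String.ofList l) ++ String.join tails.reverse := by
  intro n
  induction n using Nat.strong_induction_on with
  | _ n ih =>
      intro l hl parts tails
      cases l with
      | nil =>
          rw [bLoop, solution]
          simp
      | cons c cs =>
          have hne : String.ofList (c :: cs) ≠ "" := by
            intro h
            have := congrArg String.toList h
            simp at this
          rw [bLoop, solution, if_neg hne]
          simp only [String.toList_ofList]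
          have hscan := aScan_eq (c :: cs) (c :: cs).length 0 (by omega) (by omega)
          have hb0 : bal ((c :: cs).take 0) = 0 := by simp [bal]
          rw [hb0, List.drop_zero] at hscan
          rw [show ((c :: cs).take 0) = ([] : List Char) from rfl] at hscan
          rw [hscan]
          have hok := bScan_ok (c :: cs) 0 0
          simp only [Nat.sub_zero] at hok
          have hip : isPairLoop ((c :: cs).take ((bScan (c :: cs) 0 false 0).1)) [] =
              (decide ((bScan (c :: cs) 0 false 0).2.1 = 0) &&
                !(bScan (c :: cs) 0 false 0).2.2) := by
            rw [isPairLoop_eq_bOk]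
            simpa using hok
          have hcutpos : 1 ≤ (bScan (c :: cs) 0 false 0).1 := bScan_fst_pos c cs 0 false
          have hlen : ((c :: cs).drop ((bScan (c :: cs) 0 false 0).1)).length < n := by
            simp only [List.length_drop, ← hl, List.length_cons]
            omega
          by_cases hcond : (bScan (c :: cs) 0 false 0).2.1 = 0 ∧
              (bScan (c :: cs) 0 false 0).2.2 = false
          · rw [if_pos hcond]
            have htrue : isPairLoop ((c :: cs).take ((bScan (c :: cs) 0 false 0).1)) []
                = true := by
              rw [hip, hcond.1, hcond.2]
              simp
            simp only [htrue, if_pos rfl, if_true]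
            rw [ih _ hlen _ rfl]
            simp [join_snoc, String.append_assoc]
          · rw [if_neg hcond]
            have hfalse : isPairLoop ((c :: cs).take ((bScan (c :: cs) 0 false 0).1)) []
                = false := by
              rw [hip]
              rcases Bool.eq_false_or_eq_true (bScan (c :: cs) 0 false 0).2.2 with h2 | h2
              · simp [h2]
              · have h1 : ¬ (bScan (c :: cs) 0 false 0).2.1 = 0 := fun h1 => hcond ⟨h1, h2⟩
                simp [h1]
            simp only [hfalse, Bool.false_eq_true, if_false]
            rw [ih _ hlen _ rfl]
            have hu : (c :: cs).take ((bScan (c :: cs) 0 false 0).1) ≠ [] := by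
              simp only [ne_eq, List.take_eq_nil_iff]
              push_neg
              exact ⟨by omega, by simp⟩
            rw [slice_eq_dropLast _ hu, revA_eq_map]
            simp [join_snoc, join_cons, String.append_assoc]

-- ===== VERDICT (by name: the statement is the Claim_ definition above) =====
theorem solution_spec : Claim_equal_solution := by
  intro p _
  unfold Spec_solution solution_alt
  rw [bLoop_eq p.toList.length p.toList rfl [] []]
  simp [String.join, String.ofList_toList]
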